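-- pv_equiv track=rewrite | github.com/travboz/bookbot | main.py | count_letter_frequency
-- ===== SOURCE A (Python) =====
-- def count_letter_frequency(text):
--     """Calculate the frequency of characters in a text"""
--     char_counts = {}
--
--     for ch in text.lower():
--         if ch not in char_counts:
--             char_counts[ch] = 1
--         else:
--             char_counts[ch] += 1
--
--     return char_counts
-- ===== SOURCE B (Python) =====
-- def count_letter_frequency(text):
--     """Calculate the frequency of characters in a text"""
--     chars = list(text.lower())
--     return {ch: chars.count(ch) for ch in dict.fromkeys(chars)}
-- ===== Notes on version B (the rewrite author's own statement) =====
-- stated objective: idiomatic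
-- what changed: Instead of a single hash-increment loop, B deduplicates the lowercased characters in first-occurrence order with dict.fromkeys and builds the dict in one comprehension using list.count per distinct character.
import Mathlib
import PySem

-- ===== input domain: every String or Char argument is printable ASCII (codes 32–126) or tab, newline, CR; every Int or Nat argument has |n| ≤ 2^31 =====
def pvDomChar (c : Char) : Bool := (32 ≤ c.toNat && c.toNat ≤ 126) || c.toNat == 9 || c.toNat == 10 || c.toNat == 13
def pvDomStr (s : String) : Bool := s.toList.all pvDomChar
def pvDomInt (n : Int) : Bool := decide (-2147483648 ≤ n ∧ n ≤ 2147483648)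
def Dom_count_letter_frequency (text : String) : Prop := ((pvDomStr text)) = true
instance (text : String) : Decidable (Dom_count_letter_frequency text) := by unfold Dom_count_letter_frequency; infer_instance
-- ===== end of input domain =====

-- B replaces A's hash-increment loop by dict.fromkeys deduplication plus list.count per distinct character (idiomatic; not faster).


-- ===== PORT A =====
-- for ch in text.lower(): if ch not in char_counts: char_counts[ch] = 1 else: char_counts[ch] += 1
def count_letter_frequency (text : String) : List (String × Int) :=
  ((PySem.Str.lower text).toList.foldl (fun d ch =>
      if !(d.contains (String.ofList [ch])) then d.insert (String.ofList [ch]) 1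
      else d.modify (String.ofList [ch]) 0 (· + 1))
    PySem.Dict.empty).items

-- ===== PORT B =====
-- chars = list(text.lower()); {ch: chars.count(ch) for ch in dict.fromkeys(chars)}
def count_letter_frequency_alt (text : String) : List (String × Int) :=
  let chars := (PySem.Str.lower text).toList
  (PySem.Set.ofList chars).map (fun ch => (String.ofList [ch], (PySem.List.count chars ch : Int)))

-- ===== PRECONDITION & SPEC =====
def Spec_count_letter_frequency (text : String) (out : List (String × Int)) : Prop := out = count_letter_frequency_alt text
instance (text : String) (out : List (String × Int)) : Decidable (Spec_count_letter_frequency text out) := by unfold Spec_count_letter_frequency; infer_instance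

-- ===== CLAIM (what is proved, stated in full; the proofs are below) =====
def Claim_equal_count_letter_frequency : Prop := ∀ (text : String), Dom_count_letter_frequency text → Spec_count_letter_frequency text (count_letter_frequency text)

-- ===== LEMMAS AND PROOFS =====

theorem pvKeyInj : Function.Injective (fun c : Char => String.ofList [c]) := by
  intro a b h
  simpa using congrArg String.toList h

theorem pvStepEq (d : PySem.Dict String Int) (ch : Char) :
    (if !(d.contains (String.ofList [ch])) then d.insert (String.ofList [ch]) 1
     else d.modify (String.ofList [ch]) 0 (· + 1))
    = d.modify (String.ofList [ch]) 0 (· + 1) := by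
  by_cases h : d.contains (String.ofList [ch])
  · simp [h]
  · simp only [Bool.not_eq_true] at h
    simp [h, PySem.Dict.modify, PySem.Dict.getD_of_not_contains d 0 h]

theorem pvOfListMap (l : List Char) :
    PySem.Set.ofList (l.map (fun c => String.ofList [c]))
      = (PySem.Set.ofList l).map (fun c => String.ofList [c]) := by
  induction l with
  | nil => rfl
  | cons c cs ih =>
    simp only [List.map_cons, PySem.Set.ofList_cons, ih, PySem.Set.discard,
      List.filter_map]
    have hf : ((fun y => !y == String.ofList [c]) ∘ fun c : Char => String.ofList [c])
        = (fun y : Char => !y == c) := by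
      funext y
      have hb : (String.ofList [y] == String.ofList [c]) = (y == c) := by
        by_cases h : y = c
        · simp [h]
        · have h2 : ¬ String.ofList [y] = String.ofList [c] := fun hh => h (pvKeyInj hh)
          simp [h, h2]
      simp [Function.comp, hb]
    rw [hf]

theorem count_letter_frequency_spec : Claim_equal_count_letter_frequency := by
  intro text _
  unfold Spec_count_letter_frequency count_letter_frequency count_letter_frequency_alt
  set l := (PySem.Str.lower text).toList with hl
  have hfold :
      l.foldl (fun d ch =>
        if !(d.contains (String.ofList [ch])) then d.insert (String.ofList [ch]) 1
        else d.modify (String.ofList [ch]) 0 (· + 1)) PySem.Dict.empty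
      = PySem.Dict.counter (l.map (fun c => String.ofList [c])) := by
    have hstep :
        (fun (d : PySem.Dict String Int) ch =>
          if !(d.contains (String.ofList [ch])) then d.insert (String.ofList [ch]) 1
          else d.modify (String.ofList [ch]) 0 (· + 1))
        = (fun d ch => d.modify (String.ofList [ch]) 0 (· + 1)) := by
      funext d ch; exact pvStepEq d ch
    rw [hstep]
    simp [PySem.Dict.counter, List.foldl_map]
  rw [hfold, PySem.Dict.items_counter, pvOfListMap, List.map_map]
  refine List.map_congr_left (fun c _ => ?_)
  simp [Function.comp, List.count_map_of_injective _ _ pvKeyInj, PySem.List.count]
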